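-- pv_equiv track=rewrite | github.com/izzanzahrial/sortVisualization | quickSort.py | getColorArray
-- ===== SOURCE A (Python) =====
-- def getColorArray(array, leftIdx, rightIdx, pivotIdx):
-- 	colorArray = []
-- 	for i in range(array):
-- 		# base color
-- 		if i == pivotIdx:
-- 			colorArray.append('red')
-- 		elif i == leftIdx or i == rightIdx:
-- 			colorArray.append('yellow')
-- 		else:
-- 			colorArray.append('black')
--
-- 	return colorArray
-- ===== SOURCE B (Python) =====
-- def getColorArray(array, leftIdx, rightIdx, pivotIdx):
--     colorArray = ['black'] * array
--     for idx in (leftIdx, rightIdx):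
--         if 0 <= idx < array:
--             colorArray[idx] = 'yellow'
--     if 0 <= pivotIdx < array:
--         colorArray[pivotIdx] = 'red'
--     return colorArray
-- ===== Notes on version B (the rewrite author's own statement) =====
-- stated objective: simpler
-- what changed: Replaces the per-index branch cascade inside the building loop by a fill-then-patch pass: allocate a uniform 'black' list once with list repetition, overwrite the bounds-checked left/right positions with 'yellow', then the pivot with 'red' so pivot keeps priority.
import Mathlib
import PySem

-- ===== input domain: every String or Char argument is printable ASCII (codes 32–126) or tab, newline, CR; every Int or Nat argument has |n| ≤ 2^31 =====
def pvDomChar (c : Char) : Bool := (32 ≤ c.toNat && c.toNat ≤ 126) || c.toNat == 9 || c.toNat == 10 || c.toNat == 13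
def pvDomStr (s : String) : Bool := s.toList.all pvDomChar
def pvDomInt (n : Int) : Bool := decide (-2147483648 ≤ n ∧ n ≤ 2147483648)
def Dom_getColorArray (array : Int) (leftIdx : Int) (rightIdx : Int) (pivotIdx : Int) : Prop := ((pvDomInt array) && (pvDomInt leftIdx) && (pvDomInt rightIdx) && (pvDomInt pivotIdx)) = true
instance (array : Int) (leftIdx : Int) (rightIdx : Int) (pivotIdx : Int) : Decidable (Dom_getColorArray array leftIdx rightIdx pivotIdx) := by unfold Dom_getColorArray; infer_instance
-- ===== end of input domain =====

-- B replaces A's per-index branch cascade by fill-with-'black' then bounds-checked patches (yellow, then red last); simpler decomposition, same O(n) cost.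


-- ===== PORT A =====
def getColorArray (array : Int) (leftIdx : Int) (rightIdx : Int) (pivotIdx : Int) : List String :=
  (PySem.List.pyRange 0 array 1).foldl (fun colorArray i =>
    if i = pivotIdx then colorArray ++ ["red"]
    else if i = leftIdx ∨ i = rightIdx then colorArray ++ ["yellow"]
    else colorArray ++ ["black"]) []

-- ===== PORT B =====
def getColorArray_alt (array : Int) (leftIdx : Int) (rightIdx : Int) (pivotIdx : Int) : List String :=
  let c0 := List.replicate array.toNat "black"
  let c1 := if 0 ≤ leftIdx ∧ leftIdx < array then c0.set leftIdx.toNat "yellow" else c0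
  let c2 := if 0 ≤ rightIdx ∧ rightIdx < array then c1.set rightIdx.toNat "yellow" else c1
  if 0 ≤ pivotIdx ∧ pivotIdx < array then c2.set pivotIdx.toNat "red" else c2

-- ===== PRECONDITION & SPEC =====
def Spec_getColorArray (array : Int) (leftIdx : Int) (rightIdx : Int) (pivotIdx : Int) (out : List String) : Prop := out = getColorArray_alt array leftIdx rightIdx pivotIdx
instance (array : Int) (leftIdx : Int) (rightIdx : Int) (pivotIdx : Int) (out : List String) : Decidable (Spec_getColorArray array leftIdx rightIdx pivotIdx out) := by unfold Spec_getColorArray; infer_instance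

-- ===== CLAIM (what is proved, stated in full; the proofs are below) =====
def Claim_equal_getColorArray : Prop := ∀ (array : Int) (leftIdx : Int) (rightIdx : Int) (pivotIdx : Int), Dom_getColorArray array leftIdx rightIdx pivotIdx → Spec_getColorArray array leftIdx rightIdx pivotIdx (getColorArray array leftIdx rightIdx pivotIdx)

-- ===== LEMMAS AND PROOFS =====

-- the per-index color A's branch cascade computes
def pvColor (leftIdx rightIdx pivotIdx i : Int) : String :=
  if i = pivotIdx then "red" else if i = leftIdx ∨ i = rightIdx then "yellow" else "black"

theorem foldl_append_map {α β : Type} (f : α → β) :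
    ∀ (l : List α) (init : List β),
      l.foldl (fun acc i => acc ++ [f i]) init = init ++ l.map f := by
  intro l
  induction l with
  | nil => simp
  | cons x xs ih => intro init; simp [List.foldl, ih]

theorem getColorArray_eq_map (array leftIdx rightIdx pivotIdx : Int) :
    getColorArray array leftIdx rightIdx pivotIdx
      = (List.range array.toNat).map (fun (k : Nat) => pvColor leftIdx rightIdx pivotIdx (k : Int)) := by
  unfold getColorArray
  have hfun : (fun (colorArray : List String) (i : Int) =>
      if i = pivotIdx then colorArray ++ ["red"]
      else if i = leftIdx ∨ i = rightIdx then colorArray ++ ["yellow"]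
      else colorArray ++ ["black"])
      = fun colorArray i => colorArray ++ [pvColor leftIdx rightIdx pivotIdx i] := by
    funext acc i; unfold pvColor; split_ifs <;> rfl
  rw [hfun, foldl_append_map, PySem.List.pyRange_one]
  simp only [List.nil_append, List.map_map, sub_zero]
  exact List.map_congr_left (fun k _ => by simp [pvColor])

theorem getColorArray_alt_eq_map (array leftIdx rightIdx pivotIdx : Int) :
    getColorArray_alt array leftIdx rightIdx pivotIdx
      = (List.range array.toNat).map (fun (k : Nat) => pvColor leftIdx rightIdx pivotIdx (k : Int)) := by
  unfold getColorArray_alt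
  apply List.ext_getElem
  · split_ifs <;> simp
  · intro k h1 h2
    simp only [List.length_map, List.length_range] at h2
    simp only [List.getElem_map, List.getElem_range, pvColor]
    split_ifs <;>
      simp only [List.getElem_set, List.getElem_replicate] <;>
      split_ifs <;> first | rfl | omega

-- ===== VERDICT (by name: the statement is the Claim_ definition above) =====
theorem getColorArray_spec : Claim_equal_getColorArray := by
  intro array leftIdx rightIdx pivotIdx _
  unfold Spec_getColorArray
  rw [getColorArray_eq_map, getColorArray_alt_eq_map]
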